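-- pv_equiv track=rewrite | github.com/barahona-research-group/ICE-NODE | lib/ehr/coding_scheme.py | _dfs_edges
-- ===== SOURCE A (Python) =====
-- from typing import Set, Dict, Type, Optional, List, Union, ClassVar, Callable, Tuple, Any
--
-- def _dfs_edges(connection: Dict[str, Set[str]], code: str) -> Set[Tuple[str, str]]:
--     """
--     Returns the edges of the hierarchy obtained through a depth-first traversal.
--
--     Args:
--         connection (Dict[str, Set[str]]): the connection dictionary representing the hierarchy.
--         code (str): the starting code for the traversal.
--
--     Returns:
--         Set[Tuple[str, str]]: a set of edges in the hierarchy.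
--     """
--     result = set()
--
--     def _edges(_node):
--         for conn in connection.get(_node, []):
--             result.add((_node, conn))
--             _edges(conn)
--
--     _edges(code)
--     return result
-- ===== SOURCE B (Python) =====
-- def _dfs_edges(connection, code):
--     """Iterative depth-first edge collection: an explicit worklist stack of
--     (node, remaining-children) frames plus a visited set, so every node is
--     expanded at most once (and the loop terminates even on cyclic input)."""
--     result = set()
--     visited = {code}
--     stack = [(code, list(connection.get(code, ())))]
--     while stack:
--         node, kids = stack.pop()
--         if not kids:
--             continue
--         conn, rest = kids[0], kids[1:]
--         stack.append((node, rest))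
--         result.add((node, conn))
--         if conn not in visited:
--             visited.add(conn)
--             stack.append((conn, list(connection.get(conn, ()))))
--     return result
-- ===== Notes on version B (the rewrite author's own statement) =====
-- stated objective: alternative
-- what changed: A's naive recursion (re-expanding a node once per path reaching it, exponential on DAGs with shared substructure, non-terminating on cycles) is replaced by an iterative worklist: an explicit stack of (node, remaining-children) frames with a visited set, expanding every node at most once.
import Mathlib
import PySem

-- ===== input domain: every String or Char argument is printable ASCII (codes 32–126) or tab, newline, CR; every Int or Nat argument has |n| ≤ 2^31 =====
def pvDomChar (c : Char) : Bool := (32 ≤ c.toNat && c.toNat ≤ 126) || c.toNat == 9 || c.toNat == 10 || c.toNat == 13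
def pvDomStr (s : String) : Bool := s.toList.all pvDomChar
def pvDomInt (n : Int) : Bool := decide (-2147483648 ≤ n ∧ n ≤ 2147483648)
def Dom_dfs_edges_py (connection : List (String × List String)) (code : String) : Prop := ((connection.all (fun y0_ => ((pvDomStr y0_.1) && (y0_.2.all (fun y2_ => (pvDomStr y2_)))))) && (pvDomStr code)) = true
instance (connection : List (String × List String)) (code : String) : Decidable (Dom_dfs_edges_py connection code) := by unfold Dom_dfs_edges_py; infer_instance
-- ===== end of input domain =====

-- B replaces A's naive recursive DFS (which re-expands a node once per path reaching it) by an
-- iterative worklist: an explicit stack of (node, remaining-children) frames with a visited set,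
-- expanding each node at most once; B also terminates on cyclic inputs, where A never returns
-- (such inputs are excluded by Pre_).

-- ===== PORT A =====
-- connection.get(node, []) on the association list (first match, per the dict convention); used by both ports
def getConn (connection : List (String × List String)) (n : String) : List String :=
  ((PySem.Dict.mk connection).get? n).getD []

-- fuel bound for port A: 1 + an upper bound on the number of distinct reachable nodes
def pvFuel (connection : List (String × List String)) : Nat :=
  2 + (connection.flatMap Prod.snd).length

-- A's recursion: _edges(node): for conn in get(node): result.add((node, conn)); _edges(conn).
-- Python's unbounded recursion is guarded by fuel; under Pre_ (no reachable cycle) the fuel is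
-- proved sufficient, outside Pre_ Python A never returns.
def dfsAuxA (g : String → List String) : Nat → String → PySem.Set (String × String) → PySem.Set (String × String)
  | 0, _, r => r
  | f + 1, n, r => (g n).foldl (fun r c => dfsAuxA g f c (PySem.Set.add r (n, c))) r

def dfs_edges_py (connection : List (String × List String)) (code : String) : List (String × String) :=
  dfsAuxA (getConn connection) (pvFuel connection) code PySem.Set.empty

-- ===== PORT B =====
-- fuel bound for port B's while-loop: proved (below) to exceed the machine's exact step count on
-- EVERY input (the visited set bounds the work), so the guard never fires
def pvFuelB (connection : List (String × List String)) : Nat :=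
  ((connection.flatMap Prod.snd).length + 2) * ((connection.flatMap Prod.snd).length + 2)

-- B's while-loop, one constructor case per iteration; the stack's head is its top:
--   node, kids = stack.pop()
--   if not kids: continue
--   conn, rest = kids[0], kids[1:]; stack.append((node, rest)); result.add((node, conn))
--   if conn not in visited: visited.add(conn); stack.append((conn, list(get(conn))))
def runB (g : String → List String) : Nat → List (String × List String) → PySem.Set String → PySem.Set (String × String) → PySem.Set (String × String)
  | 0, _, _, s => s
  | _ + 1, [], _, s => s
  | f + 1, (_, []) :: rest, vis, s => runB g f rest vis s
  | f + 1, (n, c :: krest) :: rest, vis, s =>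
      let s' := PySem.Set.add s (n, c)
      if c ∈ vis then runB g f ((n, krest) :: rest) vis s'
      else runB g f ((c, g c) :: (n, krest) :: rest) (PySem.Set.add vis c) s'

def dfs_edges_py_alt (connection : List (String × List String)) (code : String) : List (String × String) :=
  runB (getConn connection) (pvFuelB connection)
    [(code, getConn connection code)]
    (PySem.Set.add PySem.Set.empty code) PySem.Set.empty

-- ===== PRECONDITION & SPEC =====
-- bounded reachability: reachBnd g k a b = "there is a g-path from a to b of at most k steps"
def reachBnd (g : String → List String) : Nat → String → String → Bool
  | 0, a, b => a == b
  | k + 1, a, b => a == b || (g a).any (fun c => reachBnd g k c b)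

-- all nodes the traversal can ever reach: the start code and every successor value
def pvNodes (connection : List (String × List String)) (code : String) : List String :=
  code :: connection.flatMap Prod.snd

-- detector: is some node n both reachable from code and on a cycle (a successor of n reaches n back)?
def cycReachable (connection : List (String × List String)) (code : String) : Bool :=
  (pvNodes connection code).any (fun n =>
    reachBnd (getConn connection) (pvNodes connection code).length code n &&
    (getConn connection n).any (fun c =>
      reachBnd (getConn connection) (pvNodes connection code).length c n))

-- Pre_ excludes exactly the inputs where Python A never returns: a cycle reachable from code
-- makes A's recursion infinite (RecursionError).
def Pre_dfs_edges_py (connection : List (String × List String)) (code : String) : Prop :=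
  cycReachable connection code = false
instance (connection : List (String × List String)) (code : String) : Decidable (Pre_dfs_edges_py connection code) := by unfold Pre_dfs_edges_py; infer_instance

def pvWitness_dfs_edges_py : (List (String × List String)) × String := ([("a", ["b"])], "a")

def Spec_dfs_edges_py (connection : List (String × List String)) (code : String) (out : List (String × String)) : Prop := out = dfs_edges_py_alt connection code
instance (connection : List (String × List String)) (code : String) (out : List (String × String)) : Decidable (Spec_dfs_edges_py connection code out) := by unfold Spec_dfs_edges_py; infer_instance

-- ===== CLAIM (what is proved, stated in full; the proofs are below) =====
def Claim_equal_dfs_edges_py : Prop := ∀ (connection : List (String × List String)) (code : String), Dom_dfs_edges_py connection code → Pre_dfs_edges_py connection code → Spec_dfs_edges_py connection code (dfs_edges_py connection code)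

-- ===== LEMMAS AND PROOFS =====

-- PROOF-SIDE BRIDGE between the two ports: the pruned DFS written recursively (visitAuxB), and
-- the same traversal instrumented with its exact step count (W).  runB is proved equal to W's
-- accumulator (machine simulation), W to visitAuxB, and visitAuxB to dfsAuxA (main_sim).
def visitAuxB (g : String → List String) : Nat → String → PySem.Set String → PySem.Set (String × String) → PySem.Set String × PySem.Set (String × String)
  | 0, _, vis, r => (vis, r)
  | f + 1, n, vis, r => (g n).foldl (fun p c =>
      let r' := PySem.Set.add p.2 (n, c)
      if c ∈ p.1 then (p.1, r')
      else visitAuxB g f c (PySem.Set.add p.1 c) r') (vis, r)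

-- W g f n kids vis s : process the remaining children `kids` of node n (children descend with
-- fuel f - 1), returning (visited, edges, exact number of machine steps incl. the empty pop)
def W (g : String → List String) : Nat → String → List String → PySem.Set String → PySem.Set (String × String) → PySem.Set String × PySem.Set (String × String) × Nat
  | _, _, [], vis, s => (vis, s, 1)
  | 0, n, c :: rest, vis, s =>
      let s' := PySem.Set.add s (n, c)
      if c ∈ vis then
        let r := W g 0 n rest vis s'
        (r.1, r.2.1, r.2.2 + 1)
      else (vis, s', 0)
  | f + 1, n, c :: rest, vis, s =>
      let s' := PySem.Set.add s (n, c)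
      if c ∈ vis then
        let r := W g (f + 1) n rest vis s'
        (r.1, r.2.1, r.2.2 + 1)
      else
        let r1 := W g f c (g c) (PySem.Set.add vis c) s'
        let r2 := W g (f + 1) n rest r1.1 r1.2.1
        (r2.1, r2.2.1, r1.2.2 + r2.2.2 + 1)
  termination_by f _ kids => (f, kids.length)

-- unbounded reachability along g
inductive Reaches (g : String → List String) : String → String → Prop
  | refl (a : String) : Reaches g a a
  | head {a b c : String} : b ∈ g a → Reaches g b c → Reaches g a c

theorem reaches_snoc {g : String → List String} {a b c : String}
    (h : Reaches g a b) (hc : c ∈ g b) : Reaches g a c := by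
  induction h with
  | refl a => exact Reaches.head hc (Reaches.refl c)
  | head hb _ ih => exact Reaches.head hb (ih hc)

-- explicit paths: PathTo g a l b means l is the list of nodes stepped through after a, ending at b
def PathTo (g : String → List String) : String → List String → String → Prop
  | a, [], b => a = b
  | a, c :: l, b => c ∈ g a ∧ PathTo g c l b

theorem reaches_pathTo {g : String → List String} {a b : String}
    (h : Reaches g a b) : ∃ l, PathTo g a l b := by
  induction h with
  | refl a => exact ⟨[], rfl⟩
  | head hb _ ih => exact ⟨_ :: ih.choose, hb, ih.choose_spec⟩

theorem pathTo_mid {g : String → List String} {b : String} :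
    ∀ (l₁ : List String) (a : String) (x : String) (l₂ : List String),
      PathTo g a (l₁ ++ x :: l₂) b → PathTo g x l₂ b := by
  intro l₁
  induction l₁ with
  | nil => intro a x l₂ h; exact h.2
  | cons c t ih => intro a x l₂ h; exact ih _ _ _ h.2

theorem pathTo_shorten {g : String → List String} {b : String} :
    ∀ (k : Nat) (l : List String) (a : String), l.length ≤ k → PathTo g a l b →
      ∃ l', PathTo g a l' b ∧ (a :: l').Nodup ∧ l' ⊆ l := by
  intro k
  induction k with
  | zero =>
      intro l a hk hp
      have hnil : l = [] := List.eq_nil_of_length_eq_zero (Nat.le_zero.mp hk)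
      subst hnil
      exact ⟨[], hp, List.nodup_singleton _, by simp⟩
  | succ k ih =>
      intro l a hk hp
      by_cases ha : a ∈ l
      · obtain ⟨l₁, l₂, rfl⟩ := List.append_of_mem ha
        have hp₂ : PathTo g a l₂ b := pathTo_mid l₁ a a l₂ hp
        have hlen : l₂.length ≤ k := by
          have := hk; simp [List.length_append] at this; omega
        obtain ⟨l', h1, h2, h3⟩ := ih l₂ a hlen hp₂
        exact ⟨l', h1, h2, fun x hx => by
          have := h3 hx; simp [List.mem_append]; tauto⟩
      · cases l with
        | nil => exact ⟨[], hp, List.nodup_singleton _, by simp⟩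
        | cons c t =>
            obtain ⟨hc, hp'⟩ := hp
            have hlen : t.length ≤ k := by simp at hk; omega
            obtain ⟨l', h1, h2, h3⟩ := ih t c hlen hp'
            refine ⟨c :: l', ⟨hc, h1⟩, ?_, ?_⟩
            · refine List.nodup_cons.mpr ⟨?_, h2⟩
              intro hmem
              rcases List.mem_cons.mp hmem with h | h
              · exact ha (h ▸ List.mem_cons_self)
              · exact ha (List.mem_cons_of_mem _ (h3 h))
            · intro x hx
              rcases List.mem_cons.mp hx with h | h
              · exact h ▸ List.mem_cons_self
              · exact List.mem_cons_of_mem _ (h3 h)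

theorem reachBnd_refl (g : String → List String) (k : Nat) (a : String) :
    reachBnd g k a a = true := by
  cases k <;> simp [reachBnd]

theorem reachBnd_of_pathTo {g : String → List String} {b : String} :
    ∀ (l : List String) (a : String) (k : Nat), PathTo g a l b → l.length ≤ k →
      reachBnd g k a b = true := by
  intro l
  induction l with
  | nil =>
      intro a k hp _
      have hab : a = b := hp
      subst hab
      exact reachBnd_refl g k a
  | cons c t ih =>
      intro a k hp hk
      cases k with
      | zero => simp at hk
      | succ k =>
          simp only [reachBnd, Bool.or_eq_true, List.any_eq_true]
          exact Or.inr ⟨c, hp.1, ih c k hp.2 (by simp at hk; omega)⟩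

-- every successor list is contained in the flatMap of the values
theorem getConn_subset {connection : List (String × List String)} {n x : String}
    (h : x ∈ getConn connection n) : x ∈ connection.flatMap Prod.snd := by
  induction connection with
  | nil => simp [getConn, PySem.Dict.get?] at h
  | cons p rest ih =>
      rw [getConn, PySem.Dict.get?_mk_cons] at h
      by_cases hpn : p.1 == n
      · simp [hpn] at h
        exact List.mem_flatMap.mpr ⟨p, List.mem_cons_self, h⟩
      · simp [hpn] at h
        have := ih (by rw [getConn]; exact h)
        simp only [List.flatMap_cons, List.mem_append]
        exact Or.inr this

-- each successor list is one of the value lists, so its length is at most the flatMap's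
theorem getConn_length_le (connection : List (String × List String)) (n : String) :
    (getConn connection n).length ≤ (connection.flatMap Prod.snd).length := by
  induction connection with
  | nil => simp [getConn, PySem.Dict.get?]
  | cons p rest ih =>
      rw [getConn, PySem.Dict.get?_mk_cons]
      by_cases hpn : p.1 == n
      · simp [hpn, List.flatMap_cons, List.length_append]
      · simp only [hpn, Bool.false_eq_true, if_false, List.flatMap_cons, List.length_append]
        simp only [getConn] at ih ⊢
        omega

-- nodes along any path lie in pvNodes
theorem pathTo_subset_nodes {connection : List (String × List String)} {code b : String} :
    ∀ (l : List String) (a : String), PathTo (getConn connection) a l b →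
      ∀ x ∈ l, x ∈ pvNodes connection code := by
  intro l
  induction l with
  | nil => intro a _ x hx; simp at hx
  | cons c t ih =>
      intro a hp x hx
      rcases List.mem_cons.mp hx with h | h
      · subst h
        exact List.mem_cons_of_mem _ (getConn_subset hp.1)
      · exact ih c hp.2 x h

theorem pathTo_end_mem {g : String → List String} {b : String} :
    ∀ (l : List String) (a : String), PathTo g a l b → b = a ∨ b ∈ l := by
  intro l
  induction l with
  | nil => intro a h; exact Or.inl h.symm
  | cons c t ih =>
      intro a h
      rcases ih c h.2 with h' | h'
      · exact Or.inr (h' ▸ List.mem_cons_self)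
      · exact Or.inr (List.mem_cons_of_mem _ h')

theorem reaches_mem_nodes {connection : List (String × List String)} {code n : String}
    (h : Reaches (getConn connection) code n) : n ∈ pvNodes connection code := by
  obtain ⟨l, hl⟩ := reaches_pathTo h
  rcases pathTo_end_mem l code hl with h' | h'
  · exact h' ▸ List.mem_cons_self
  · exact pathTo_subset_nodes l code hl n h'

-- no cycle reachable from code, in Prop form
def NoCyc (g : String → List String) (code : String) : Prop :=
  ∀ n c, Reaches g code n → c ∈ g n → Reaches g c n → False

theorem nodup_subset_length {l u : List String} (h : l.Nodup) (hs : l ⊆ u) :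
    l.length ≤ u.length := by
  have h1 : l.toFinset.card = l.length := List.toFinset_card_of_nodup h
  have h2 : l.toFinset ⊆ u.toFinset := by intro x hx; simp at hx ⊢; exact hs hx
  have h3 := Finset.card_le_card h2
  have h4 : u.toFinset.card ≤ u.length := u.toFinset_card_le
  omega

theorem reachBnd_of_reaches_from {connection : List (String × List String)} {code a b : String}
    (hr : Reaches (getConn connection) a b) (ha : a ∈ pvNodes connection code) :
    reachBnd (getConn connection) (pvNodes connection code).length a b = true := by
  obtain ⟨l, hl⟩ := reaches_pathTo hr
  obtain ⟨l', h1, h2, h3⟩ := pathTo_shorten l.length l a (Nat.le_refl _) hl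
  refine reachBnd_of_pathTo l' a _ h1 ?_
  have hsub : (a :: l') ⊆ pvNodes connection code := by
    intro x hx
    rcases List.mem_cons.mp hx with h | h
    · exact h ▸ ha
    · exact pathTo_subset_nodes l' a h1 x h
  have := nodup_subset_length h2 hsub
  simp at this; omega

theorem pre_noCyc {connection : List (String × List String)} {code : String}
    (h : Pre_dfs_edges_py connection code) : NoCyc (getConn connection) code := by
  intro n c hrn hc hcn
  have hnU : n ∈ pvNodes connection code := reaches_mem_nodes hrn
  have hcU : c ∈ pvNodes connection code :=
    List.mem_cons_of_mem _ (getConn_subset hc)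
  have h1 : reachBnd (getConn connection) (pvNodes connection code).length code n = true :=
    reachBnd_of_reaches_from hrn List.mem_cons_self
  have h2 : reachBnd (getConn connection) (pvNodes connection code).length c n = true :=
    reachBnd_of_reaches_from hcn hcU
  have hcyc : cycReachable connection code = true := by
    simp only [cycReachable, List.any_eq_true]
    exact ⟨n, hnU, by rw [h1]; simp only [Bool.true_and, List.any_eq_true]; exact ⟨c, hc, h2⟩⟩
  rw [Pre_dfs_edges_py] at h
  simp [hcyc] at h

theorem pathTo_mem_reaches {g : String → List String} {b : String} :
    ∀ (l : List String) (c x : String), PathTo g c l b → x ∈ l → Reaches g c x := by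
  intro l
  induction l with
  | nil => intro c x _ hx; simp at hx
  | cons d t ih =>
      intro c x hp hx
      rcases List.mem_cons.mp hx with h | h
      · exact h ▸ Reaches.head hp.1 (Reaches.refl d)
      · exact Reaches.head hp.1 (ih d x hp.2 h)

-- paths from code are duplicate-free when no reachable cycle exists
theorem pathTo_nodup {g : String → List String} {code b : String} (hnc : NoCyc g code) :
    ∀ (l : List String) (n : String), Reaches g code n → PathTo g n l b → (n :: l).Nodup := by
  intro l
  induction l with
  | nil => intro n _ _; exact List.nodup_singleton n
  | cons c t ih =>
      intro n hrn hp
      obtain ⟨hc, hp'⟩ := hp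
      have hrc : Reaches g code c := reaches_snoc hrn hc
      have hnd : (c :: t).Nodup := ih c hrc hp'
      refine List.nodup_cons.mpr ⟨?_, hnd⟩
      intro hmem
      have hreach : Reaches g c n := by
        rcases List.mem_cons.mp hmem with h | h
        · exact h ▸ Reaches.refl n
        · exact pathTo_mem_reaches t c n hp' h
      exact hnc n c hrn hc hreach

-- all edges reachable from n are already collected in S
def Done (g : String → List String) (n : String) (S : List (String × String)) : Prop :=
  ∀ m c, Reaches g n m → c ∈ g m → (m, c) ∈ S

theorem done_mono {g : String → List String} {n : String} {S S' : List (String × String)}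
    (h : Done g n S) (hsub : ∀ e ∈ S, e ∈ S') : Done g n S' :=
  fun m c hr hc => hsub _ (h m c hr hc)

theorem done_step {g : String → List String} {n c : String} {S : List (String × String)}
    (h : Done g n S) (hc : c ∈ g n) : Done g c S :=
  fun m d hr hd => h m d (Reaches.head hc hr) hd

-- A's traversal from a Done node adds nothing (any fuel)
theorem dfsAuxA_of_done {g : String → List String} :
    ∀ (f : Nat) (n : String) (S : PySem.Set (String × String)), Done g n S →
      dfsAuxA g f n S = S := by
  intro f
  induction f with
  | zero => intro n S _; rfl
  | succ f ih =>
      intro n S hd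
      show (g n).foldl (fun r c => dfsAuxA g f c (PySem.Set.add r (n, c))) S = S
      have key : ∀ (cs : List String), (∀ c ∈ cs, c ∈ g n) →
          cs.foldl (fun r c => dfsAuxA g f c (PySem.Set.add r (n, c))) S = S := by
        intro cs
        induction cs with
        | nil => intro _; rfl
        | cons c t iht =>
            intro hcs
            have hc : c ∈ g n := hcs c List.mem_cons_self
            have hmem : (n, c) ∈ S := hd n c (Reaches.refl n) hc
            have hadd : PySem.Set.add S (n, c) = S := PySem.Set.add_of_mem hmem
            simp only [List.foldl_cons, hadd, ih c S (done_step hd hc)]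
            exact iht (fun x hx => hcs x (List.mem_cons_of_mem _ hx))
      exact key (g n) (fun _ h => h)

-- the simulation lemma: the pruned DFS produces exactly A's accumulator
theorem main_sim {g : String → List String} {code : String} (hnc : NoCyc g code) :
    ∀ (f : Nat) (n : String) (V : PySem.Set String) (S : PySem.Set (String × String)),
      Reaches g code n → n ∈ V →
      (∀ v ∈ V, Done g v S ∨ Reaches g v n) →
      (∀ l b, PathTo g n l b → l.length < f) →
      dfsAuxA g f n S = (visitAuxB g f n V S).2
      ∧ (∀ e ∈ S, e ∈ (visitAuxB g f n V S).2)
      ∧ (∀ v ∈ V, v ∈ (visitAuxB g f n V S).1)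
      ∧ (∀ v ∈ (visitAuxB g f n V S).1, Done g v (visitAuxB g f n V S).2 ∨ (v ∈ V ∧ Reaches g v n))
      ∧ Done g n (visitAuxB g f n V S).2 := by
  intro f
  induction f with
  | zero =>
      intro n V S _ _ _ hf
      exact absurd (hf [] n rfl) (by omega)
  | succ f ih =>
      intro n V S hr hnV hinv hf
      have inner : ∀ (cs : List String), (∀ c ∈ cs, c ∈ g n) →
          ∀ (V : PySem.Set String) (S : PySem.Set (String × String)), n ∈ V →
          (∀ v ∈ V, Done g v S ∨ Reaches g v n) →
          (cs.foldl (fun r c => dfsAuxA g f c (PySem.Set.add r (n, c))) S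
            = (cs.foldl (fun p c =>
                let r' := PySem.Set.add p.2 (n, c)
                if c ∈ p.1 then (p.1, r')
                else visitAuxB g f c (PySem.Set.add p.1 c) r') (V, S)).2)
          ∧ (∀ e ∈ S, e ∈ (cs.foldl (fun p c =>
                let r' := PySem.Set.add p.2 (n, c)
                if c ∈ p.1 then (p.1, r')
                else visitAuxB g f c (PySem.Set.add p.1 c) r') (V, S)).2)
          ∧ (∀ v ∈ V, v ∈ (cs.foldl (fun p c =>
                let r' := PySem.Set.add p.2 (n, c)
                if c ∈ p.1 then (p.1, r')
                else visitAuxB g f c (PySem.Set.add p.1 c) r') (V, S)).1)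
          ∧ (∀ v ∈ (cs.foldl (fun p c =>
                let r' := PySem.Set.add p.2 (n, c)
                if c ∈ p.1 then (p.1, r')
                else visitAuxB g f c (PySem.Set.add p.1 c) r') (V, S)).1,
              Done g v (cs.foldl (fun p c =>
                let r' := PySem.Set.add p.2 (n, c)
                if c ∈ p.1 then (p.1, r')
                else visitAuxB g f c (PySem.Set.add p.1 c) r') (V, S)).2
              ∨ (v ∈ V ∧ Reaches g v n))
          ∧ (∀ c ∈ cs, (n, c) ∈ (cs.foldl (fun p c =>
                let r' := PySem.Set.add p.2 (n, c)
                if c ∈ p.1 then (p.1, r')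
                else visitAuxB g f c (PySem.Set.add p.1 c) r') (V, S)).2
              ∧ Done g c (cs.foldl (fun p c =>
                let r' := PySem.Set.add p.2 (n, c)
                if c ∈ p.1 then (p.1, r')
                else visitAuxB g f c (PySem.Set.add p.1 c) r') (V, S)).2) := by
        intro cs
        induction cs with
        | nil =>
            intro _ V S hnV' hinv'
            refine ⟨rfl, fun e he => he, fun v hv => hv, ?_, by simp⟩
            intro v hv
            rcases hinv' v hv with h | h
            · exact Or.inl h
            · exact Or.inr ⟨hv, h⟩
        | cons c t itih =>
            intro hcs V S hnV' hinv'
            have hc : c ∈ g n := hcs c List.mem_cons_self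
            have hcs' : ∀ x ∈ t, x ∈ g n := fun x hx => hcs x (List.mem_cons_of_mem _ hx)
            have hS₁ : ∀ e ∈ S, e ∈ PySem.Set.add S (n, c) :=
              fun e he => (PySem.Set.mem_add _ _ _).mpr (Or.inl he)
            have hedge : (n, c) ∈ PySem.Set.add S (n, c) := (PySem.Set.mem_add _ _ _).mpr (Or.inr rfl)
            have hrc : Reaches g code c := reaches_snoc hr hc
            simp only [List.foldl_cons]
            by_cases hcV : c ∈ V
            · -- c already visited: it cannot be an ancestor (no cycle), so it is Done
              have hdc : Done g c S := by
                rcases hinv' c hcV with h | h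
                · exact h
                · exact (hnc n c hr hc h).elim
              have hdc₁ : Done g c (PySem.Set.add S (n, c)) := done_mono hdc hS₁
              have hA : dfsAuxA g f c (PySem.Set.add S (n, c)) = PySem.Set.add S (n, c) :=
                dfsAuxA_of_done f c _ hdc₁
              have hinv₁ : ∀ v ∈ V, Done g v (PySem.Set.add S (n, c)) ∨ Reaches g v n :=
                fun v hv => (hinv' v hv).imp (fun h => done_mono h hS₁) id
              obtain ⟨i1, i2, i3, i4, i5⟩ := itih hcs' V (PySem.Set.add S (n, c)) hnV' hinv₁
              simp only [if_pos hcV, hA]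
              refine ⟨i1, fun e he => i2 e (hS₁ e he), i3, i4, ?_⟩
              intro d hd
              rcases List.mem_cons.mp hd with h | h
              · subst h
                exact ⟨i2 _ hedge, done_mono hdc₁ i2⟩
              · exact i5 d h
            · -- c unvisited: recurse (apply the fuel induction hypothesis)
              have hmemc : c ∈ PySem.Set.add V c := (PySem.Set.mem_add _ _ _).mpr (Or.inr rfl)
              have hinvc : ∀ v ∈ PySem.Set.add V c,
                  Done g v (PySem.Set.add S (n, c)) ∨ Reaches g v c := by
                intro v hv
                rcases (PySem.Set.mem_add _ _ _).mp hv with h | h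
                · rcases hinv' v h with h' | h'
                  · exact Or.inl (done_mono h' hS₁)
                  · exact Or.inr (reaches_snoc h' hc)
                · subst h; exact Or.inr (Reaches.refl _)
              have hfc : ∀ l b, PathTo g c l b → l.length < f := by
                intro l b hp
                have := hf (c :: l) b ⟨hc, hp⟩
                simp at this; omega
              obtain ⟨e1, e2, e3, e4, e5⟩ :=
                ih c (PySem.Set.add V c) (PySem.Set.add S (n, c)) hrc hmemc hinvc hfc
              have hQinv : ∀ v ∈ (visitAuxB g f c (PySem.Set.add V c) (PySem.Set.add S (n, c))).1,
                  Done g v (visitAuxB g f c (PySem.Set.add V c) (PySem.Set.add S (n, c))).2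
                  ∨ (v ∈ V ∧ Reaches g v n) := by
                intro v hv
                rcases e4 v hv with h | ⟨hvm, _⟩
                · exact Or.inl h
                · rcases (PySem.Set.mem_add _ _ _).mp hvm with h' | h'
                  · rcases hinv' v h' with h'' | h''
                    · exact Or.inl (done_mono h'' (fun e he => e2 e (hS₁ e he)))
                    · exact Or.inr ⟨h', h''⟩
                  · exact Or.inl (h' ▸ e5)
              have hnQ : n ∈ (visitAuxB g f c (PySem.Set.add V c) (PySem.Set.add S (n, c))).1 :=
                e3 n ((PySem.Set.mem_add _ _ _).mpr (Or.inl hnV'))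
              have hinvQ : ∀ v ∈ (visitAuxB g f c (PySem.Set.add V c) (PySem.Set.add S (n, c))).1,
                  Done g v (visitAuxB g f c (PySem.Set.add V c) (PySem.Set.add S (n, c))).2
                  ∨ Reaches g v n :=
                fun v hv => (hQinv v hv).imp id And.right
              obtain ⟨i1, i2, i3, i4, i5⟩ := itih hcs'
                (visitAuxB g f c (PySem.Set.add V c) (PySem.Set.add S (n, c))).1
                (visitAuxB g f c (PySem.Set.add V c) (PySem.Set.add S (n, c))).2 hnQ hinvQ
              simp only [if_neg hcV, e1]
              refine ⟨by rw [i1], ?_, ?_, ?_, ?_⟩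
              · exact fun e he => i2 e (e2 e (hS₁ e he))
              · exact fun v hv => i3 v (e3 v ((PySem.Set.mem_add _ _ _).mpr (Or.inl hv)))
              · intro v hv
                rcases i4 v hv with h | ⟨hvQ, hvr⟩
                · exact Or.inl h
                · rcases hQinv v hvQ with h' | h'
                  · exact Or.inl (done_mono h' i2)
                  · exact Or.inr h'
              · intro d hd
                rcases List.mem_cons.mp hd with h | h
                · subst h
                  exact ⟨i2 _ (e2 _ hedge), done_mono e5 i2⟩
                · exact i5 d h
      obtain ⟨E1, E2, E3, E4, E5⟩ := inner (g n) (fun _ h => h) V S hnV hinv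
      have hVisit : visitAuxB g (f + 1) n V S = (g n).foldl (fun p c =>
          let r' := PySem.Set.add p.2 (n, c)
          if c ∈ p.1 then (p.1, r')
          else visitAuxB g f c (PySem.Set.add p.1 c) r') (V, S) := rfl
      have hDfs : dfsAuxA g (f + 1) n S =
          (g n).foldl (fun r c => dfsAuxA g f c (PySem.Set.add r (n, c))) S := rfl
      rw [hVisit, hDfs]
      refine ⟨E1, E2, E3, E4, ?_⟩
      intro m c hR hm
      cases hR with
      | refl => exact (E5 c hm).1
      | head hb hR' => exact (E5 _ hb).2 m c hR' hm

-- W agrees with visitAuxB's fold when the fuel dominates the remaining path length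
theorem W_eq_visit {g : String → List String} :
    ∀ (f : Nat) (kids : List String) (n : String) (V : PySem.Set String)
      (S : PySem.Set (String × String)),
      (∀ c ∈ kids, c ∈ g n) →
      (∀ l b, PathTo g n l b → l.length < f + 1) →
      ((W g f n kids V S).1, (W g f n kids V S).2.1)
        = kids.foldl (fun p c =>
            let r' := PySem.Set.add p.2 (n, c)
            if c ∈ p.1 then (p.1, r')
            else visitAuxB g f c (PySem.Set.add p.1 c) r') (V, S) := by
  intro f
  induction f with
  | zero =>
      intro kids
      induction kids with
      | nil => intro n V S _ _; simp [W]
      | cons c rest ih =>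
          intro n V S hks hd
          by_cases hcV : c ∈ V
          · simp only [W, if_pos hcV, List.foldl_cons]
            exact ih n V (PySem.Set.add S (n, c))
              (fun x hx => hks x (List.mem_cons_of_mem _ hx)) hd
          · exact absurd (hd [c] c ⟨hks c List.mem_cons_self, rfl⟩) (by simp)
  | succ f ihf =>
      intro kids
      induction kids with
      | nil => intro n V S _ _; simp [W]
      | cons c rest ih =>
          intro n V S hks hd
          have hc : c ∈ g n := hks c List.mem_cons_self
          by_cases hcV : c ∈ V
          · simp only [W, if_pos hcV, List.foldl_cons]
            exact ih n V (PySem.Set.add S (n, c))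
              (fun x hx => hks x (List.mem_cons_of_mem _ hx)) hd
          · have hdc : ∀ l b, PathTo g c l b → l.length < f + 1 := by
              intro l b hp
              have := hd (c :: l) b ⟨hc, hp⟩
              simp at this; omega
            have h1 := ihf (g c) c (PySem.Set.add V c) (PySem.Set.add S (n, c))
              (fun _ h => h) hdc
            have h1' : visitAuxB g (f + 1) c (PySem.Set.add V c) (PySem.Set.add S (n, c))
                = ((W g f c (g c) (PySem.Set.add V c) (PySem.Set.add S (n, c))).1,
                   (W g f c (g c) (PySem.Set.add V c) (PySem.Set.add S (n, c))).2.1) := h1.symm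
            simp only [W, if_neg hcV, List.foldl_cons, h1']
            exact ih n (W g f c (g c) (PySem.Set.add V c) (PySem.Set.add S (n, c))).1
              (W g f c (g c) (PySem.Set.add V c) (PySem.Set.add S (n, c))).2.1
              (fun x hx => hks x (List.mem_cons_of_mem _ hx)) hd

-- the machine consumes exactly W's step count: running the top frame to completion
-- transforms the state exactly as W does, in exactly W's number of iterations
theorem runB_eq_W {g : String → List String} :
    ∀ (f : Nat) (kids : List String) (n : String)
      (rest : List (String × List String)) (V : PySem.Set String)
      (S : PySem.Set (String × String)) (F : Nat),
      (∀ c ∈ kids, c ∈ g n) →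
      (∀ l b, PathTo g n l b → l.length < f + 1) →
      runB g ((W g f n kids V S).2.2 + F) ((n, kids) :: rest) V S
        = runB g F rest (W g f n kids V S).1 (W g f n kids V S).2.1 := by
  intro f
  induction f with
  | zero =>
      intro kids
      induction kids with
      | nil =>
          intro n rest V S F _ _
          simp only [W]
          rw [Nat.add_comm 1 F]
          rfl
      | cons c krest ih =>
          intro n rest V S F hks hd
          by_cases hcV : c ∈ V
          · simp only [W, if_pos hcV]
            have e : (W g 0 n krest V (PySem.Set.add S (n, c))).2.2 + 1 + F
                = ((W g 0 n krest V (PySem.Set.add S (n, c))).2.2 + F) + 1 := by omega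
            rw [e]
            simp only [runB, if_pos hcV]
            exact ih n rest V (PySem.Set.add S (n, c)) F
              (fun x hx => hks x (List.mem_cons_of_mem _ hx)) hd
          · exact absurd (hd [c] c ⟨hks c List.mem_cons_self, rfl⟩) (by simp)
  | succ f ihf =>
      intro kids
      induction kids with
      | nil =>
          intro n rest V S F _ _
          simp only [W]
          rw [Nat.add_comm 1 F]
          rfl
      | cons c krest ih =>
          intro n rest V S F hks hd
          have hc : c ∈ g n := hks c List.mem_cons_self
          by_cases hcV : c ∈ V
          · simp only [W, if_pos hcV]
            have e : (W g (f + 1) n krest V (PySem.Set.add S (n, c))).2.2 + 1 + F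
                = ((W g (f + 1) n krest V (PySem.Set.add S (n, c))).2.2 + F) + 1 := by omega
            rw [e]
            simp only [runB, if_pos hcV]
            exact ih n rest V (PySem.Set.add S (n, c)) F
              (fun x hx => hks x (List.mem_cons_of_mem _ hx)) hd
          · have hdc : ∀ l b, PathTo g c l b → l.length < f + 1 := by
              intro l b hp
              have := hd (c :: l) b ⟨hc, hp⟩
              simp at this; omega
            simp only [W, if_neg hcV]
            have e : (W g f c (g c) (PySem.Set.add V c) (PySem.Set.add S (n, c))).2.2
                  + (W g (f + 1) n krest
                      (W g f c (g c) (PySem.Set.add V c) (PySem.Set.add S (n, c))).1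
                      (W g f c (g c) (PySem.Set.add V c) (PySem.Set.add S (n, c))).2.1).2.2
                  + 1 + F
                = ((W g f c (g c) (PySem.Set.add V c) (PySem.Set.add S (n, c))).2.2
                  + ((W g (f + 1) n krest
                      (W g f c (g c) (PySem.Set.add V c) (PySem.Set.add S (n, c))).1
                      (W g f c (g c) (PySem.Set.add V c) (PySem.Set.add S (n, c))).2.1).2.2
                    + F)) + 1 := by omega
            rw [e]
            simp only [runB, if_neg hcV]
            rw [ihf (g c) c ((n, krest) :: rest) (PySem.Set.add V c) (PySem.Set.add S (n, c))
              (_ + F) (fun _ h => h) hdc]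
            exact ih n rest (W g f c (g c) (PySem.Set.add V c) (PySem.Set.add S (n, c))).1
              (W g f c (g c) (PySem.Set.add V c) (PySem.Set.add S (n, c))).2.1 F
              (fun x hx => hks x (List.mem_cons_of_mem _ hx)) hd

-- potential of the visited set: total number of machine steps the visited nodes can still cause
def potW (g : String → List String) (V : List String) : Nat :=
  (V.map (fun v => (g v).length + 1)).sum

-- W's step count is bounded through the growth of the visited set's potential
theorem W_cost_bound {connection : List (String × List String)} {code : String} :
    ∀ (f : Nat) (kids : List String) (n : String) (V : PySem.Set String)
      (S : PySem.Set (String × String)),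
      V.Nodup → (∀ v ∈ V, v ∈ pvNodes connection code) →
      (∀ c ∈ kids, c ∈ connection.flatMap Prod.snd) →
      (W (getConn connection) f n kids V S).1.Nodup
      ∧ (∀ v ∈ (W (getConn connection) f n kids V S).1, v ∈ pvNodes connection code)
      ∧ (W (getConn connection) f n kids V S).2.2 + potW (getConn connection) V
        ≤ kids.length + 1 + potW (getConn connection) (W (getConn connection) f n kids V S).1 := by
  intro f
  induction f with
  | zero =>
      intro kids
      induction kids with
      | nil =>
          intro n V S hnd hmem _
          refine ⟨?_, ?_, ?_⟩ <;> simp only [W]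
          · exact hnd
          · exact hmem
          · omega
      | cons c krest ih =>
          intro n V S hnd hmem hks
          by_cases hcV : c ∈ V
          · obtain ⟨i1, i2, i3⟩ := ih n V (PySem.Set.add S (n, c)) hnd hmem
              (fun x hx => hks x (List.mem_cons_of_mem _ hx))
            refine ⟨?_, ?_, ?_⟩ <;> simp only [W, if_pos hcV]
            · exact i1
            · exact i2
            · simp only [List.length_cons]; omega
          · refine ⟨?_, ?_, ?_⟩ <;> simp only [W, if_neg hcV]
            · exact hnd
            · exact hmem
            · simp only [List.length_cons]; omega
  | succ f ihf =>
      intro kids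
      induction kids with
      | nil =>
          intro n V S hnd hmem _
          refine ⟨?_, ?_, ?_⟩ <;> simp only [W]
          · exact hnd
          · exact hmem
          · omega
      | cons c krest ih =>
          intro n V S hnd hmem hks
          have hcFM : c ∈ connection.flatMap Prod.snd := hks c List.mem_cons_self
          by_cases hcV : c ∈ V
          · obtain ⟨i1, i2, i3⟩ := ih n V (PySem.Set.add S (n, c)) hnd hmem
              (fun x hx => hks x (List.mem_cons_of_mem _ hx))
            refine ⟨?_, ?_, ?_⟩ <;> simp only [W, if_pos hcV]
            · exact i1
            · exact i2
            · simp only [List.length_cons]; omega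
          · have haddnd : (PySem.Set.add V c).Nodup := PySem.Set.nodup_add _ _ hnd
            have haddmem : ∀ v ∈ PySem.Set.add V c, v ∈ pvNodes connection code := by
              intro v hv
              rcases (PySem.Set.mem_add _ _ _).mp hv with h | h
              · exact hmem v h
              · exact h ▸ List.mem_cons_of_mem _ hcFM
            have hgc : ∀ x ∈ getConn connection c, x ∈ connection.flatMap Prod.snd :=
              fun x hx => getConn_subset hx
            obtain ⟨e1, e2, e3⟩ := ihf (getConn connection c) c (PySem.Set.add V c)
              (PySem.Set.add S (n, c)) haddnd haddmem hgc
            obtain ⟨i1, i2, i3⟩ := ih n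
              (W (getConn connection) f c (getConn connection c) (PySem.Set.add V c)
                (PySem.Set.add S (n, c))).1
              (W (getConn connection) f c (getConn connection c) (PySem.Set.add V c)
                (PySem.Set.add S (n, c))).2.1
              e1 e2 (fun x hx => hks x (List.mem_cons_of_mem _ hx))
            have hpot : potW (getConn connection) (PySem.Set.add V c)
                = potW (getConn connection) V + ((getConn connection c).length + 1) := by
              rw [PySem.Set.add_of_not_mem hcV]
              simp [potW]
            refine ⟨?_, ?_, ?_⟩ <;> simp only [W, if_neg hcV]
            · exact i1
            · exact i2
            · simp only [List.length_cons]
              omega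

-- running the machine on an empty stack returns the accumulator, whatever the fuel
theorem runB_nil {g : String → List String} (F : Nat) (V : PySem.Set String)
    (S : PySem.Set (String × String)) : runB g F [] V S = S := by
  cases F <;> rfl

-- each visited node's potential contribution is at most L + 1
theorem potW_le {connection : List (String × List String)} (V : List String) :
    potW (getConn connection) V
      ≤ V.length * ((connection.flatMap Prod.snd).length + 1) := by
  induction V with
  | nil => simp [potW]
  | cons v t ih =>
      have hv := getConn_length_le connection v
      simp only [potW, List.map_cons, List.sum_cons, List.length_cons] at ih ⊢
      have : (t.length + 1) * ((connection.flatMap Prod.snd).length + 1)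
          = t.length * ((connection.flatMap Prod.snd).length + 1)
            + ((connection.flatMap Prod.snd).length + 1) := by ring
      omega

-- ===== VERDICT (by name: the statement is the Claim_ definition above) =====
theorem dfs_edges_py_spec : Claim_equal_dfs_edges_py := by
  intro connection code _ hPre
  have hnc := pre_noCyc hPre
  have hf : ∀ l b, PathTo (getConn connection) code l b → l.length < pvFuel connection := by
    intro l b hp
    have hnd : (code :: l).Nodup := pathTo_nodup hnc l code (Reaches.refl code) hp
    have hsub : (code :: l) ⊆ pvNodes connection code := by
      intro x hx
      rcases List.mem_cons.mp hx with h | h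
      · exact h ▸ List.mem_cons_self
      · exact pathTo_subset_nodes l code hp x h
    have := nodup_subset_length hnd hsub
    simp [pvNodes, pvFuel] at this ⊢
    omega
  -- abbreviations
  have hinv : ∀ v ∈ PySem.Set.add PySem.Set.empty code,
      Done (getConn connection) v PySem.Set.empty ∨ Reaches (getConn connection) v code := by
    intro v hv
    rcases (PySem.Set.mem_add _ _ _).mp hv with h | h
    · simp [PySem.Set.empty] at h
    · subst h; exact Or.inr (Reaches.refl _)
  -- A = pruned recursive DFS
  obtain ⟨E1, _⟩ := main_sim hnc (pvFuel connection) code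
    (PySem.Set.add PySem.Set.empty code) PySem.Set.empty
    (Reaches.refl code) ((PySem.Set.mem_add _ _ _).mpr (Or.inr rfl)) hinv hf
  -- pruned recursive DFS = W (fuel (flatMap).length + 1, so that fuel+1 = pvFuel)
  have hfuel : pvFuel connection = ((connection.flatMap Prod.snd).length + 1) + 1 := by
    simp [pvFuel]; omega
  have hf' : ∀ l b, PathTo (getConn connection) code l b →
      l.length < ((connection.flatMap Prod.snd).length + 1) + 1 := by
    intro l b hp; have := hf l b hp; omega
  have hgcode : ∀ c ∈ getConn connection code, c ∈ getConn connection code := fun _ h => h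
  have hWvis := W_eq_visit ((connection.flatMap Prod.snd).length + 1)
    (getConn connection code) code (PySem.Set.add PySem.Set.empty code) PySem.Set.empty
    hgcode hf'
  have hvisit : visitAuxB (getConn connection) (pvFuel connection) code
      (PySem.Set.add PySem.Set.empty code) PySem.Set.empty
      = ((W (getConn connection) ((connection.flatMap Prod.snd).length + 1) code
          (getConn connection code) (PySem.Set.add PySem.Set.empty code) PySem.Set.empty).1,
         (W (getConn connection) ((connection.flatMap Prod.snd).length + 1) code
          (getConn connection code) (PySem.Set.add PySem.Set.empty code) PySem.Set.empty).2.1) := by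
    rw [hfuel]
    exact hWvis.symm
  -- W's cost fits under pvFuelB
  have hV0nd : (PySem.Set.add PySem.Set.empty code).Nodup := by
    simp [PySem.Set.add, PySem.Set.empty, PySem.Set.contains]
  have hV0mem : ∀ v ∈ PySem.Set.add PySem.Set.empty code, v ∈ pvNodes connection code := by
    intro v hv
    rcases (PySem.Set.mem_add _ _ _).mp hv with h | h
    · simp [PySem.Set.empty] at h
    · exact h ▸ List.mem_cons_self
  have hgcFM : ∀ c ∈ getConn connection code, c ∈ connection.flatMap Prod.snd :=
    fun _ h => getConn_subset h
  obtain ⟨c1, c2, c3⟩ := W_cost_bound ((connection.flatMap Prod.snd).length + 1)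
    (getConn connection code) code (PySem.Set.add PySem.Set.empty code) PySem.Set.empty
    hV0nd hV0mem hgcFM
  have hpot0 : potW (getConn connection) (PySem.Set.add PySem.Set.empty code)
      = (getConn connection code).length + 1 := by
    show potW (getConn connection) [code] = _
    simp [potW]
  have hVflen : (W (getConn connection) ((connection.flatMap Prod.snd).length + 1) code
      (getConn connection code) (PySem.Set.add PySem.Set.empty code) PySem.Set.empty).1.length
      ≤ (connection.flatMap Prod.snd).length + 1 := by
    have h := nodup_subset_length c1 c2
    simp only [pvNodes, List.length_cons] at h
    omega
  have hpotVf := potW_le (connection := connection)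
    (W (getConn connection) ((connection.flatMap Prod.snd).length + 1) code
      (getConn connection code) (PySem.Set.add PySem.Set.empty code) PySem.Set.empty).1
  have hcost : (W (getConn connection) ((connection.flatMap Prod.snd).length + 1) code
      (getConn connection code) (PySem.Set.add PySem.Set.empty code) PySem.Set.empty).2.2
      ≤ pvFuelB connection := by
    have hA : (W (getConn connection) ((connection.flatMap Prod.snd).length + 1) code
        (getConn connection code) (PySem.Set.add PySem.Set.empty code) PySem.Set.empty).2.2
        ≤ potW (getConn connection)
            (W (getConn connection) ((connection.flatMap Prod.snd).length + 1) code
              (getConn connection code) (PySem.Set.add PySem.Set.empty code) PySem.Set.empty).1 := by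
      omega
    have hB := le_trans hA hpotVf
    have hC := le_trans hB (Nat.mul_le_mul hVflen (Nat.le_refl _))
    have hD : ((connection.flatMap Prod.snd).length + 1)
          * ((connection.flatMap Prod.snd).length + 1)
        ≤ ((connection.flatMap Prod.snd).length + 2)
          * ((connection.flatMap Prod.snd).length + 2) :=
      Nat.mul_le_mul (by omega) (by omega)
    rw [pvFuelB]
    exact le_trans hC hD
  -- the machine runs W's steps and then the fuel surplus on an empty stack
  have hrun := runB_eq_W ((connection.flatMap Prod.snd).length + 1)
    (getConn connection code) code []
    (PySem.Set.add PySem.Set.empty code) PySem.Set.empty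
    (pvFuelB connection
      - (W (getConn connection) ((connection.flatMap Prod.snd).length + 1) code
          (getConn connection code) (PySem.Set.add PySem.Set.empty code) PySem.Set.empty).2.2)
    hgcode hf'
  rw [Nat.add_sub_cancel' hcost, runB_nil] at hrun
  show dfsAuxA (getConn connection) (pvFuel connection) code PySem.Set.empty
      = dfs_edges_py_alt connection code
  rw [E1, hvisit, dfs_edges_py_alt, hrun]
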